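-- pv_equiv track=rewrite | github.com/wolverin0/memorymaster | memorymaster/operator.py | _strip_prefix_words
-- ===== SOURCE A (Python) =====
-- def _strip_prefix_words(value: str) -> str:
--     lowered = value.strip().lower()
--     for prefix in (
--         "the ",
--         "our ",
--         "my ",
--         "a ",
--         "an ",
--         "current ",
--         "official ",
--         "correction ",
--         "corrected ",
--         "update ",
--         "updated ",
--     ):
--         if lowered.startswith(prefix):
--             return value.strip()[len(prefix) :].strip()
--     return value.strip()
-- ===== SOURCE B (Python) =====
-- _PREFIX_WORDS = {
--     "the", "our", "my", "a", "an", "current", "official",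
--     "correction", "corrected", "update", "updated",
-- }
--
--
-- def _strip_prefix_words(value: str) -> str:
--     s = value.strip()
--     i = s.find(' ')
--     if i != -1 and s[:i].lower() in _PREFIX_WORDS:
--         return s[i + 1:].strip()
--     return s
-- ===== Notes on version B (the rewrite author's own statement) =====
-- stated objective: idiomatic
-- what changed: Replaces A's ordered per-prefix startswith scan (11 string-prefix tests) by locating the first space once with find, slicing off the first word, and testing its lowercased form against a set of prefix words.
import Mathlib
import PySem

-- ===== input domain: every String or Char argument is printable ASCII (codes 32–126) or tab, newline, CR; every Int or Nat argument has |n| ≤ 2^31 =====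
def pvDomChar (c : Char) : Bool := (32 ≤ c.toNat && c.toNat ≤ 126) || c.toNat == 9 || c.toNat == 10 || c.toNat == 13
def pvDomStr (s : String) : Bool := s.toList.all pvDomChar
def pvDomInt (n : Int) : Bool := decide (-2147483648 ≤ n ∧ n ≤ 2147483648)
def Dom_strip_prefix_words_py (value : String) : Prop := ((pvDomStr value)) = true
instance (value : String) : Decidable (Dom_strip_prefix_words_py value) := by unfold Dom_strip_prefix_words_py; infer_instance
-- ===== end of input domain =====

-- B replaces A's per-prefix startswith scan by locating the first space once and testing the
-- lowercased first word against a set of prefix words (objective: idiomatic/alternative).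


-- ===== PORT A =====
-- the tuple of prefixes A iterates over, in order
def pvPrefixesA : List (List Char) :=
  ["the ".toList, "our ".toList, "my ".toList, "a ".toList, "an ".toList, "current ".toList,
   "official ".toList, "correction ".toList, "corrected ".toList, "update ".toList, "updated ".toList]

-- A's for-loop with its early return: first matching prefix wins
def stripALoop (stripped lowered : List Char) : List (List Char) → List Char
  | [] => stripped
  | p :: ps =>
    if PySem.Chars.startswith lowered p then
      PySem.Chars.strip (PySem.List.slice stripped (some (p.length : Int)) none)
    else stripALoop stripped lowered ps

def strip_prefix_words_py (value : String) : String :=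
  let lowered := PySem.Chars.lower (PySem.Chars.strip value.toList)
  String.ofList (stripALoop (PySem.Chars.strip value.toList) lowered pvPrefixesA)

-- ===== PORT B =====
-- the set _PREFIX_WORDS (distinct literals)
def pvPrefixWords : List (List Char) :=
  ["the".toList, "our".toList, "my".toList, "a".toList, "an".toList, "current".toList,
   "official".toList, "correction".toList, "corrected".toList, "update".toList, "updated".toList]

def strip_prefix_words_py_alt (value : String) : String :=
  let s := PySem.Chars.strip value.toList
  let i := PySem.Chars.find s [' ']
  if i ≠ -1 ∧ pvPrefixWords.contains (PySem.Chars.lower (PySem.List.slice s none (some i))) then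
    String.ofList (PySem.Chars.strip (PySem.List.slice s (some (i + 1)) none))
  else
    String.ofList s

-- ===== PRECONDITION & SPEC =====
def Spec_strip_prefix_words_py (value : String) (out : String) : Prop := out = strip_prefix_words_py_alt value
instance (value : String) (out : String) : Decidable (Spec_strip_prefix_words_py value out) := by unfold Spec_strip_prefix_words_py; infer_instance

-- ===== CLAIM (what is proved, stated in full; the proofs are below) =====
def Claim_equal_strip_prefix_words_py : Prop := ∀ (value : String), Dom_strip_prefix_words_py value → Spec_strip_prefix_words_py value (strip_prefix_words_py value)

-- ===== LEMMAS AND PROOFS =====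

theorem charOfNat_toNat (n : Nat) (h : n.isValidChar) : (Char.ofNat n).toNat = n := by
  unfold Char.ofNat
  rw [dif_pos h]
  simp [Char.ofNatAux, Char.toNat]

theorem lowerChar_eq_space_iff (c : Char) : PySem.Chars.lowerChar c = ' ' ↔ c = ' ' := by
  unfold PySem.Chars.lowerChar PySem.Chars.isupper
  by_cases hup : ('A' ≤ c ∧ c ≤ 'Z')
  · rw [if_pos (by simp [hup.1, hup.2])]
    have h1 : 65 ≤ c.toNat := hup.1
    have h2 : c.toNat ≤ 90 := hup.2
    constructor
    · intro he
      exfalso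
      have hv : (c.toNat + 32).isValidChar := Or.inl (by omega)
      have := congrArg Char.toNat he
      rw [charOfNat_toNat _ hv, show (' ').toNat = 32 from rfl] at this
      omega
    · intro he
      exfalso
      subst he
      rw [show (' ').toNat = 32 from rfl] at h1
      omega
  · rw [if_neg (by simpa [Bool.and_eq_true, decide_eq_true_eq] using hup)]

theorem space_mem_lower (s : List Char) : ' ' ∈ PySem.Chars.lower s ↔ ' ' ∈ s := by
  simp only [PySem.Chars.lower, List.mem_map]
  constructor
  · rintro ⟨c, hc, h⟩; rwa [(lowerChar_eq_space_iff c).mp h] at hc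
  · intro h; exact ⟨' ', h, (lowerChar_eq_space_iff ' ').mpr rfl⟩

-- two space-free words followed by a space, prefixes of the same list, coincide
theorem word_prefix_unique {a b t : List Char} (ha : ' ' ∉ a) (hb : ' ' ∉ b)
    (h : a ++ [' '] <+: b ++ ' ' :: t) : a = b := by
  have hb' : b ++ [' '] <+: b ++ ' ' :: t := ⟨t, by simp⟩
  have hlen : a.length = b.length := by
    by_contra hne
    rcases Nat.lt_or_ge a.length b.length with hlt | hge
    · have h1 : a ++ [' '] <+: b :=
        List.prefix_of_prefix_length_le h (List.prefix_append b (' ' :: t)) (by simp; omega)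
      exact hb (h1.subset (by simp))
    · have hgt : b.length < a.length := by omega
      have h1 : b ++ [' '] <+: a ++ [' '] :=
        List.prefix_of_prefix_length_le hb' h (by simp; omega)
      have h2 : b ++ [' '] <+: a :=
        List.prefix_of_prefix_length_le h1 (List.prefix_append a [' ']) (by simp; omega)
      exact ha (h2.subset (by simp))
  have hA : a <+: b ++ ' ' :: t := ((List.prefix_append a [' ']).trans h)
  have hB : b <+: b ++ ' ' :: t := List.prefix_append b (' ' :: t)
  exact (List.prefix_of_prefix_length_le hA hB (by omega)).eq_of_length hlen

-- A's loop when no prefix matches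
theorem stripALoop_no_match (stripped lowered : List Char) (L : List (List Char))
    (h : ∀ p ∈ L, PySem.Chars.startswith lowered p = false) :
    stripALoop stripped lowered L = stripped := by
  induction L with
  | nil => rfl
  | cons p ps ih =>
    simp only [stripALoop, h p (by simp)]
    exact ih fun q hq => h q (by simp [hq])

-- A's loop when exactly one prefix matches
theorem stripALoop_match (stripped lowered : List Char) (L : List (List Char)) (w : List Char)
    (hmem : w ∈ L)
    (huniq : ∀ p ∈ L, PySem.Chars.startswith lowered p = true ↔ p = w) :
    stripALoop stripped lowered L
      = PySem.Chars.strip (PySem.List.slice stripped (some (w.length : Int)) none) := by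
  induction L with
  | nil => cases hmem
  | cons p ps ih =>
    by_cases hp : p = w
    · subst hp
      simp only [stripALoop, (huniq p (by simp)).mpr rfl, if_true]
    · have : PySem.Chars.startswith lowered p = false := by
        by_contra h
        exact hp ((huniq p (by simp)).mp (by revert h; cases PySem.Chars.startswith lowered p <;> simp))
      simp only [stripALoop, this, Bool.false_eq_true, if_false]
      have hmem' : w ∈ ps := by cases hmem with
        | head => exact absurd rfl hp
        | tail _ h => exact h
      exact ih hmem' fun q hq => huniq q (by simp [hq])

theorem pvPrefixesA_eq : pvPrefixesA = pvPrefixWords.map (· ++ [' ']) := by decide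

theorem pvPrefixWords_no_space : ∀ w ∈ pvPrefixWords, ' ' ∉ w := by decide

-- central equality on the already-stripped character list
theorem core_eq (s : List Char) :
    stripALoop s (PySem.Chars.lower s) pvPrefixesA
      = (let i := PySem.Chars.find s [' ']
         if i ≠ -1 ∧ pvPrefixWords.contains (PySem.Chars.lower (PySem.List.slice s none (some i))) then
           PySem.Chars.strip (PySem.List.slice s (some (i + 1)) none)
         else s) := by
  simp only []
  by_cases h0 : PySem.Chars.find s [' '] = -1
  · -- no space in s: neither side strips anything
    have hnospace : ' ' ∉ s := fun hmem =>
      (PySem.Chars.find_eq_neg_one_iff s [' ']).mp h0 ((List.singleton_infix_iff ' ' s).mpr hmem)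
    rw [if_neg (by simp [h0])]
    apply stripALoop_no_match
    intro p hp
    rw [pvPrefixesA_eq] at hp
    obtain ⟨w, _, rfl⟩ := List.mem_map.mp hp
    by_contra hT
    have hT' : PySem.Chars.startswith (PySem.Chars.lower s) (w ++ [' ']) = true := by
      revert hT; cases PySem.Chars.startswith (PySem.Chars.lower s) (w ++ [' ']) <;> simp
    have hmem : ' ' ∈ PySem.Chars.lower s :=
      ((PySem.Chars.startswith_iff _ _).mp hT').subset (by simp)
    exact hnospace ((space_mem_lower s).mp hmem)
  · have hge : 0 ≤ PySem.Chars.find s [' '] := by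
      have := PySem.Chars.neg_one_le_find s [' ']; omega
    obtain ⟨hpre, hmin⟩ := PySem.Chars.find_spec hge
    set n := (PySem.Chars.find s [' ']).toNat with hn
    obtain ⟨t0, ht0⟩ := hpre
    have hlt : n < s.length := by
      have := congrArg List.length ht0
      simp at this
      omega
    have hdrop : s.drop n = ' ' :: s.drop (n + 1) := by
      rw [← ht0]
      simp only [List.singleton_append]
      congr 1
      have : s.drop (n + 1) = (s.drop n).drop 1 := by rw [List.drop_drop]
      rw [this, ← ht0]
      simp
    have hdecomp : s = s.take n ++ ' ' :: s.drop (n + 1) := by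
      conv_lhs => rw [← List.take_append_drop n s]
      rw [hdrop]
    have hx : ' ' ∉ s.take n := by
      intro hmem
      obtain ⟨j, hj, hval⟩ := List.getElem_of_mem hmem
      obtain ⟨hjn, hjlen⟩ : j < n ∧ j < s.length := by simpa using hj
      apply hmin j hjn
      have hvals : s[j] = ' ' := by simpa using hval
      refine ⟨s.drop (j + 1), ?_⟩
      rw [List.singleton_append, ← hvals]
      exact (List.drop_eq_getElem_cons hjlen).symm
    have hxlow : ' ' ∉ PySem.Chars.lower (s.take n) := fun hmem =>
      hx ((space_mem_lower _).mp hmem)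
    have hslice : PySem.List.slice s none (some (PySem.Chars.find s [' '])) = s.take n :=
      PySem.List.slice_to s hge
    have hlowdecomp : PySem.Chars.lower s
        = PySem.Chars.lower (s.take n) ++ ' ' :: PySem.Chars.lower (s.drop (n + 1)) := by
      conv_lhs => rw [hdecomp]
      simp [PySem.Chars.lower, PySem.Chars.lowerChar, PySem.Chars.isupper]
    have hlen0 : (PySem.Chars.lower (s.take n)).length = n := by
      simp [PySem.Chars.lower]
      omega
    by_cases hw : PySem.Chars.lower (s.take n) ∈ pvPrefixWords
    · -- the first word is a prefix word: both sides strip it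
      rw [if_pos ⟨h0, by rw [hslice]; exact List.contains_iff_mem.mpr hw⟩]
      rw [stripALoop_match s (PySem.Chars.lower s) pvPrefixesA
            (PySem.Chars.lower (s.take n) ++ [' '])
            (by rw [pvPrefixesA_eq]; exact List.mem_map.mpr ⟨_, hw, rfl⟩)
            ?uniq]
      case uniq =>
        intro p hp
        rw [pvPrefixesA_eq] at hp
        obtain ⟨w, hwmem, rfl⟩ := List.mem_map.mp hp
        constructor
        · intro hT
          have hpre' := (PySem.Chars.startswith_iff _ _).mp hT
          rw [hlowdecomp] at hpre'
          have := word_prefix_unique (pvPrefixWords_no_space w hwmem) hxlow hpre'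
          rw [this]
        · intro he
          have hwe : w = PySem.Chars.lower (s.take n) := by simpa using he
          subst hwe
          apply (PySem.Chars.startswith_iff _ _).mpr
          rw [hlowdecomp]
          exact ⟨PySem.Chars.lower (s.drop (n + 1)), by simp⟩
      · congr 1
        have hlenp : ((PySem.Chars.lower (s.take n) ++ [' ']).length : Int)
            = PySem.Chars.find s [' '] + 1 := by
          simp [hlen0]
          omega
        rw [hlenp]
    · -- first word not a prefix word: neither side strips
      rw [if_neg (by
        rw [hslice]
        intro hc
        exact hw (List.contains_iff_mem.mp hc.2))]
      apply stripALoop_no_match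
      intro p hp
      rw [pvPrefixesA_eq] at hp
      obtain ⟨w, hwmem, rfl⟩ := List.mem_map.mp hp
      by_contra hT
      have hT' : PySem.Chars.startswith (PySem.Chars.lower s) (w ++ [' ']) = true := by
        revert hT; cases PySem.Chars.startswith (PySem.Chars.lower s) (w ++ [' ']) <;> simp
      have hpre' := (PySem.Chars.startswith_iff _ _).mp hT'
      rw [hlowdecomp] at hpre'
      exact hw (word_prefix_unique (pvPrefixWords_no_space w hwmem) hxlow hpre' ▸ hwmem)

-- ===== VERDICT (by name: the statement is the Claim_ definition above) =====
theorem strip_prefix_words_py_spec : Claim_equal_strip_prefix_words_py := by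
  intro value _
  unfold Spec_strip_prefix_words_py strip_prefix_words_py strip_prefix_words_py_alt
  have h := core_eq (PySem.Chars.strip value.toList)
  simp only at h ⊢
  rw [h]
  split <;> rfl
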